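-- pv_equiv track=rewrite | github.com/molcathy/Python_QR_Code | qr_matrix.py | add_separators
-- ===== SOURCE A (Python) =====
-- def add_separators(qr):
--     separator_size = 7
--
--     # I know that the separators are always in the same place
--     # The qr size is used to dynamically allocate that separator in the same place
--     for i in range(len(qr)):
--         for j in range(len(qr[i])):
--             # top left
--             if (i == separator_size and j <= separator_size) or (i <= separator_size and j == separator_size):
--                 qr[i][j] = 'W'
--
--             # top right
--             if (i <= separator_size and j == len(qr) - separator_size - 1) or (i == separator_size and j >= len(qr) - separator_size - 1):
--                 qr[i][j] = 'W'
--
--             # bottom left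
--             if (i == len(qr) - separator_size - 1 and j <= separator_size) or (i >= len(qr) - separator_size - 1 and j == separator_size):
--                 qr[i][j] = 'W'
--     return qr
-- ===== SOURCE B (Python) =====
-- def add_separators(qr):
--     n = len(qr)
--     s = 7
--     m = n - s - 1
--     for i, row in enumerate(qr):
--         L = len(row)
--         cols = []
--         if i <= s:
--             cols += [s, m]
--         if i == s:
--             cols += range(s + 1)
--             cols += range(max(m, 0), L)
--         if i == m:
--             cols += range(s + 1)
--         if i >= m:
--             cols.append(s)
--         for j in cols:
--             if 0 <= j < L:
--                 row[j] = 'W'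
--     return qr
-- ===== Notes on version B (the rewrite author's own statement) =====
-- stated objective: faster
-- what changed: A scans every cell of the grid and tests it against the six separator conditions; B computes, per row, the exact list of separator column indices and assigns only those cells.
import Mathlib
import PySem

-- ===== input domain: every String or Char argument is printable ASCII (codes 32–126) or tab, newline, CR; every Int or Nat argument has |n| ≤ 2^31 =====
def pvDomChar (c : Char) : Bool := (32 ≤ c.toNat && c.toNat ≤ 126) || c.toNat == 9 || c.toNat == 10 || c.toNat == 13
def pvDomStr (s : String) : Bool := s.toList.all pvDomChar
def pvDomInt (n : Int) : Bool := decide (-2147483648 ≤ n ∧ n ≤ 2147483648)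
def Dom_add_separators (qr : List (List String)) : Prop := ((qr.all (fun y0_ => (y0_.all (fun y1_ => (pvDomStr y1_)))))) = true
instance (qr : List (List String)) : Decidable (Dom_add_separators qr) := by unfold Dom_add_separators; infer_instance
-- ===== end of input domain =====

-- B replaces A's full-grid double scan, which tests every cell against six separator
-- conditions, by directly assigning only the separator cells of each row (objective: faster).
-- Both Pythons mutate qr in place; the equivalence proved here is about the return value.

-- ===== PORT A =====
-- qr[i][j] = 'W'
def pvSetW (g : List (List String)) (i j : Nat) : List (List String) :=
  g.set i ((g.getD i []).set j "W")

-- body of A's inner loop: the three conditional assignments, in order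
def pvStepA (i : Nat) (g : List (List String)) (j : Nat) : List (List String) :=
  let g := if ((i : Int) = 7 ∧ (j : Int) ≤ 7) ∨ ((i : Int) ≤ 7 ∧ (j : Int) = 7) then
      pvSetW g i j else g
  let g := if ((i : Int) ≤ 7 ∧ (j : Int) = (g.length : Int) - 7 - 1) ∨
      ((i : Int) = 7 ∧ (j : Int) ≥ (g.length : Int) - 7 - 1) then pvSetW g i j else g
  let g := if ((i : Int) = (g.length : Int) - 7 - 1 ∧ (j : Int) ≤ 7) ∨
      ((i : Int) ≥ (g.length : Int) - 7 - 1 ∧ (j : Int) = 7) then pvSetW g i j else g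
  g

def add_separators (qr : List (List String)) : List (List String) :=
  (List.range qr.length).foldl
    (fun g i => (List.range (g.getD i []).length).foldl (pvStepA i) g) qr

-- ===== PORT B =====
-- the list of separator column indices of row i (Source B's 'cols')
def pvCols (n i : Nat) (L : Int) : List Int :=
  let s : Int := 7
  let m : Int := (n : Int) - s - 1
  let cols : List Int := []
  let cols := if (i : Int) ≤ s then cols ++ [s, m] else cols
  let cols := if (i : Int) = s then
      (cols ++ PySem.List.pyRange 0 (s + 1) 1) ++ PySem.List.pyRange (max m 0) L 1 else cols
  let cols := if (i : Int) = m then cols ++ PySem.List.pyRange 0 (s + 1) 1 else cols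
  let cols := if (i : Int) ≥ m then cols ++ [s] else cols
  cols

-- Source B's per-row body: assign 'W' at each in-bounds separator column
def pvAltRow (n i : Nat) (row : List String) : List String :=
  let L : Int := (row.length : Int)
  (pvCols n i L).foldl (fun (r : List String) (j : Int) => if 0 ≤ j ∧ j < L then r.set j.toNat "W" else r) row

def add_separators_alt (qr : List (List String)) : List (List String) :=
  qr.mapIdx (fun i row => pvAltRow qr.length i row)

-- ===== PRECONDITION & SPEC =====
def Spec_add_separators (qr : List (List String)) (out : List (List String)) : Prop := out = add_separators_alt qr
instance (qr : List (List String)) (out : List (List String)) : Decidable (Spec_add_separators qr out) := by unfold Spec_add_separators; infer_instance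

-- ===== CLAIM (what is proved, stated in full; the proofs are below) =====
def Claim_equal_add_separators : Prop := ∀ (qr : List (List String)), Dom_add_separators qr → Spec_add_separators qr (add_separators qr)

-- ===== LEMMAS AND PROOFS =====

-- the union of A's six conditions for cell (i, j) of an n-row grid
def pvC (n i j : Int) : Bool :=
  decide ((i = 7 ∧ j ≤ 7) ∨ (i ≤ 7 ∧ j = 7) ∨
    (i ≤ 7 ∧ j = n - 8) ∨ (i = 7 ∧ j ≥ n - 8) ∨
    (i = n - 8 ∧ j ≤ 7) ∨ (i ≥ n - 8 ∧ j = 7))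

-- the common closed form both programs compute
def pvRowSpec (n i : Nat) (row : List String) : List String :=
  row.mapIdx (fun j x => if pvC (n : Int) (i : Int) (j : Int) then "W" else x)

theorem pvSetW_length (g : List (List String)) (i j : Nat) :
    (pvSetW g i j).length = g.length := by
  simp [pvSetW]

theorem pvSetW_setW (g : List (List String)) (i j : Nat) (h : i < g.length) :
    pvSetW (pvSetW g i j) i j = pvSetW g i j := by
  unfold pvSetW
  rw [show (g.set i ((g.getD i []).set j "W")).getD i [] = (g.getD i []).set j "W" from by
    rw [List.getD_eq_getElem _ _ (by simpa using h), List.getElem_set_self], List.set_set,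
    List.set_set]

theorem pvStepA_eq (i j : Nat) (g : List (List String)) (h : i < g.length) :
    pvStepA i g j = if pvC (g.length : Int) (i : Int) (j : Int) then pvSetW g i j else g := by
  unfold pvStepA
  simp only [pvC, decide_eq_true_eq]
  split_ifs with h1 h2 h3 h4 <;>
    first
      | rfl
      | (try rw [pvSetW_setW g i j h]) <;>
        (try rw [pvSetW_setW g i j h]) <;>
          (first | rfl | (exfalso; omega))

theorem pvStepA_fold (i : Nat) (js : List Nat) (g : List (List String)) (h : i < g.length) :
    js.foldl (pvStepA i) g =
      g.set i (js.foldl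
        (fun (r : List String) (j : Nat) => if pvC (g.length : Int) (i : Int) (j : Int) then r.set j "W" else r)
        (g.getD i [])) := by
  induction js generalizing g with
  | nil =>
    simp only [List.foldl_nil]
    rw [List.getD_eq_getElem _ _ h, List.set_getElem_self]
  | cons j js ih =>
    simp only [List.foldl_cons]
    rw [pvStepA_eq i j g h]
    by_cases hc : pvC (g.length : Int) (i : Int) (j : Int) = true
    · rw [if_pos hc]
      have h' : i < (pvSetW g i j).length := by rw [pvSetW_length]; exact h
      rw [ih (pvSetW g i j) h']
      have hgetD : (pvSetW g i j).getD i [] = (g.getD i []).set j "W" := by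
        unfold pvSetW
        rw [List.getD_eq_getElem _ _ (by simpa using h), List.getElem_set_self]
      simp only [pvSetW_length, hgetD]
      unfold pvSetW
      rw [List.set_set]
      simp [hc]
    · rw [if_neg hc]
      rw [ih g h]
      simp [hc]

theorem pvRowFold_length (n i : Nat) (js : List Nat) (row : List String) :
    (js.foldl (fun (r : List String) (j : Nat) => if pvC (n : Int) (i : Int) (j : Int) then r.set j "W" else r)
      row).length = row.length := by
  induction js generalizing row with
  | nil => rfl
  | cons j js ih => simp only [List.foldl_cons]; split_ifs <;> simp [ih]

theorem pvRowFold_getElem (n i : Nat) (L : Nat) (row : List String) (k : Nat)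
    (hk : k < row.length) :
    ((List.range L).foldl
        (fun (r : List String) (j : Nat) =>
          if pvC (n : Int) (i : Int) (j : Int) then r.set j "W" else r) row)[k]? =
      some (if pvC (n : Int) (i : Int) (k : Int) ∧ k < L then "W" else row[k]) := by
  induction L with
  | zero => simp [List.getElem?_eq_getElem hk]
  | succ L ih =>
    simp only [List.range_succ, List.foldl_append, List.foldl_cons, List.foldl_nil]
    by_cases hc : pvC (n : Int) (i : Int) (L : Int) = true
    · rw [if_pos hc, List.getElem?_set]
      by_cases hLk : L = k
      · subst hLk
        rw [if_pos rfl, if_pos (by rw [pvRowFold_length]; exact hk)]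
        simp [hc]
      · rw [if_neg hLk, ih]
        congr 1
        apply if_congr _ rfl rfl
        constructor <;> rintro ⟨h1, h2⟩ <;> exact ⟨h1, by omega⟩
    · rw [if_neg hc, ih]
      congr 1
      apply if_congr _ rfl rfl
      constructor
      · rintro ⟨h1, h2⟩; exact ⟨h1, by omega⟩
      · rintro ⟨h1, h2⟩
        have : k ≠ L := fun e => hc (e ▸ h1)
        exact ⟨h1, by omega⟩

theorem pvRowFold_spec (n i : Nat) (row : List String) :
    (List.range row.length).foldl
        (fun (r : List String) (j : Nat) =>
          if pvC (n : Int) (i : Int) (j : Int) then r.set j "W" else r) row =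
      pvRowSpec n i row := by
  apply List.ext_getElem?
  intro k
  by_cases hk : k < row.length
  · rw [pvRowFold_getElem n i row.length row k hk,
      List.getElem?_eq_getElem (show k < (pvRowSpec n i row).length by simpa [pvRowSpec] using hk)]
    simp [pvRowSpec, List.getElem_mapIdx, hk]
  · rw [List.getElem?_eq_none (by rw [pvRowFold_length]; omega),
      List.getElem?_eq_none (by simp [pvRowSpec]; omega)]

-- A's body is exactly one pass of the spec over each row, in order
theorem pvStepA_length (i : Nat) (g : List (List String)) (j : Nat) :
    (pvStepA i g j).length = g.length := by
  unfold pvStepA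
  dsimp only
  split_ifs <;> simp [pvSetW_length]

theorem pvInner_length (i : Nat) (js : List Nat) (g : List (List String)) :
    (js.foldl (pvStepA i) g).length = g.length := by
  induction js generalizing g with
  | nil => rfl
  | cons j js ih => rw [List.foldl_cons, ih, pvStepA_length]

theorem pvOuter_length (qr : List (List String)) (js : List Nat) :
    (js.foldl (fun g i => (List.range (g.getD i []).length).foldl (pvStepA i) g) qr).length
      = qr.length := by
  induction js generalizing qr with
  | nil => rfl
  | cons i js ih => rw [List.foldl_cons, ih, pvInner_length]

theorem pvOuter_getElem (qr : List (List String)) :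
    ∀ (m : Nat), m ≤ qr.length → ∀ (k : Nat), ∀ (hk : k < qr.length),
    ((List.range m).foldl
        (fun g i => (List.range (g.getD i []).length).foldl (pvStepA i) g) qr)[k]? =
      some (if k < m then pvRowSpec qr.length k (qr[k]'hk) else qr[k]'hk) := by
  intro m
  induction m with
  | zero => intro _ k hk; simp [List.getElem?_eq_getElem hk]
  | succ m ih =>
    intro hm k hk
    have hm' : m ≤ qr.length := by omega
    have hmlt : m < qr.length := by omega
    simp only [List.range_succ, List.foldl_append, List.foldl_cons, List.foldl_nil]
    have hGlen : ((List.range m).foldl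
        (fun g i => (List.range (g.getD i []).length).foldl (pvStepA i) g) qr).length
        = qr.length := pvOuter_length qr (List.range m)
    have hGm : ((List.range m).foldl
        (fun g i => (List.range (g.getD i []).length).foldl (pvStepA i) g) qr).getD m []
        = qr[m]'hmlt := by
      rw [List.getD_eq_getElem?_getD, ih hm' m hmlt]
      simp
    rw [pvStepA_fold m _ _ (by rw [hGlen]; exact hmlt)]
    rw [hGm, hGlen, pvRowFold_spec qr.length m (qr[m]'hmlt)]
    rw [List.getElem?_set]
    by_cases hmk : m = k
    · subst hmk
      rw [if_pos rfl, if_pos (by rw [hGlen]; exact hmlt), if_pos (by omega)]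
    · rw [if_neg hmk, ih hm' k hk]
      congr 1
      apply if_congr _ rfl rfl
      omega

theorem addA_spec (qr : List (List String)) :
    add_separators qr = qr.mapIdx (fun i row => pvRowSpec qr.length i row) := by
  apply List.ext_getElem?
  intro k
  by_cases hk : k < qr.length
  · unfold add_separators
    rw [pvOuter_getElem qr qr.length le_rfl k hk,
      List.getElem?_eq_getElem (show k < (qr.mapIdx fun i row => pvRowSpec qr.length i row).length
        by simpa using hk)]
    simp [List.getElem_mapIdx, hk]
  · rw [List.getElem?_eq_none (by unfold add_separators; rw [pvOuter_length]; omega),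
      List.getElem?_eq_none (by simp; omega)]

-- B side
theorem pvColsFold_length (L : Int) (cols : List Int) (row : List String) :
    (cols.foldl (fun (r : List String) (j : Int) => if 0 ≤ j ∧ j < L then r.set j.toNat "W" else r) row).length
      = row.length := by
  induction cols generalizing row with
  | nil => rfl
  | cons j js ih => simp only [List.foldl_cons]; split_ifs <;> simp [ih]

theorem pvColsFold_getElem (L : Int) (cols : List Int) (row : List String) (k : Nat)
    (hk : k < row.length) (hkL : (k : Int) < L) :
    (cols.foldl (fun (r : List String) (j : Int) =>
        if 0 ≤ j ∧ j < L then r.set j.toNat "W" else r) row)[k]? =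
      some (if (k : Int) ∈ cols then "W" else row[k]) := by
  induction cols generalizing row with
  | nil => simp [List.getElem?_eq_getElem hk]
  | cons j js ih =>
    simp only [List.foldl_cons]
    by_cases hj : 0 ≤ j ∧ j < L
    · rw [if_pos hj, ih (row.set j.toNat "W") (by simpa using hk)]
      rw [List.getElem_set]
      by_cases hjk : (k : Int) = j
      · have hje : j.toNat = k := by omega
        simp [List.mem_cons, hje, hjk]
      · have hje : ¬ j.toNat = k := by omega
        simp [List.mem_cons, hje, hjk]
    · rw [if_neg hj, ih row hk]
      have hjk : ¬ (k : Int) = j := by omega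
      simp [List.mem_cons, hjk]

theorem pvCols_mem (n i : Nat) (L j : Int) (h0 : 0 ≤ j) (hL : j < L) :
    (j ∈ pvCols n i L) ↔ pvC (n : Int) (i : Int) j = true := by
  unfold pvCols pvC
  dsimp only
  split_ifs with h1 h2 h3 h4 <;>
    simp only [List.mem_append, List.mem_cons,
      PySem.List.mem_pyRange_one, List.not_mem_nil, decide_eq_true_eq, false_or, or_false, false_iff] <;>
    omega

theorem pvAltRow_spec (n i : Nat) (row : List String) :
    pvAltRow n i row = pvRowSpec n i row := by
  apply List.ext_getElem?
  intro k
  by_cases hk : k < row.length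
  · unfold pvAltRow
    rw [pvColsFold_getElem ((row.length : Int)) _ row k hk (by exact_mod_cast hk),
      List.getElem?_eq_getElem (show k < (pvRowSpec n i row).length by simpa [pvRowSpec] using hk)]
    simp only [pvRowSpec, List.getElem_mapIdx]
    simp only [pvCols_mem n i ((row.length : Int)) ((k : Int)) (by positivity) (by exact_mod_cast hk)]
  · rw [List.getElem?_eq_none (by unfold pvAltRow; rw [pvColsFold_length]; omega),
      List.getElem?_eq_none (by simp [pvRowSpec]; omega)]

theorem addB_spec (qr : List (List String)) :
    add_separators_alt qr = qr.mapIdx (fun i row => pvRowSpec qr.length i row) := by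
  unfold add_separators_alt
  congr 1
  funext i row
  exact pvAltRow_spec qr.length i row

-- ===== VERDICT (by name: the statement is the Claim_ definition above) =====
theorem add_separators_spec : Claim_equal_add_separators := by
  intro qr _
  unfold Spec_add_separators
  rw [addA_spec, addB_spec]
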